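-- pv_equiv track=rewrite | github.com/msruan/algoritmos_2023.1 | R_map_filter_reduce (menu)/py/my_utils.py | eh_numero
-- ===== SOURCE A (Python) =====
-- def eh_digito(num):
--     for i in range(10):
--         if num == str(i):
--             return True
--     return False
--
-- def eh_numero(num):
--     ha_nums = False
--     ha_um_ponto = False
--     primeiro = 0
--     if eh_traco(num[0]):
--         primeiro = 1
--     for i in range(primeiro,length(num)):
--         if eh_digito(num[i]):
--             ha_nums = True
--         elif eh_ponto(num[i]):
--             if ha_um_ponto:
--                 return False
--             ha_um_ponto = True
--         else:
--             return False
--     return ha_nums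
--
-- def eh_traco(char):
--     return (char == '-')
--
-- def eh_ponto(num):
--     return ord(num) == 46
--
-- def length(vetor):
--     count = 0
--     for _ in vetor:
--         count += 1
--     return count
-- ===== SOURCE B (Python) =====
-- def eh_numero(num):
--     body = num[1:] if num[0] == '-' else num
--     parts = body.split('.')
--     if len(parts) > 2:
--         return False
--     has_digit = False
--     for part in parts:
--         for c in part:
--             if not ('0' <= c <= '9'):
--                 return False
--             has_digit = True
--     return has_digit
-- ===== Notes on version B (the rewrite author's own statement) =====
-- stated objective: simpler
-- what changed: Replaces the flag-carrying per-character scan, whose hand-rolled digit test compares each character against the ten decimal digit strings, by splitting the body after an optional leading dash on the dot separator into groups: more than two groups rejects, then each group's characters are range-checked as ASCII digits while tracking whether any digit was seen.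
import Mathlib
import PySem

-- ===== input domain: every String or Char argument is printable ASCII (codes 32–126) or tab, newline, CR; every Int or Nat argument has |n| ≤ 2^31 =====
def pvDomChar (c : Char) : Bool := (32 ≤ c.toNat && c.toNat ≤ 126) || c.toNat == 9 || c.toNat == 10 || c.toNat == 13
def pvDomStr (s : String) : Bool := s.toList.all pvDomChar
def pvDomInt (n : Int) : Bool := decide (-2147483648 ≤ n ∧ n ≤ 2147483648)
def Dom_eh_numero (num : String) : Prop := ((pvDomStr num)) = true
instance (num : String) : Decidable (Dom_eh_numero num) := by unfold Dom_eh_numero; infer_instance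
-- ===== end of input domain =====

-- B validates by splitting the body (after an optional leading '-') on '.' into groups and
-- range-checking each group's characters, instead of A's flag-carrying per-character scan
-- with a hand-rolled digit test; objective: simpler.

-- ===== PORT A =====
def eh_digito (s : String) : Bool :=
  (PySem.List.pyRange 0 10 1).any (fun i => s == PySem.Int.toStr i)

def eh_traco (char : Char) : Bool := char == '-'

def eh_ponto (num : Char) : Bool := ((num.toNat : Int) == 46)

def lengthA (vetor : String) : Int :=
  vetor.toList.foldl (fun count _ => count + 1) 0

-- the 'for i in range(primeiro, length(num))' loop with its early returns
def ehLoopA (num : String) : List Int → Bool → Bool → Bool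
  | [], ha_nums, _ => ha_nums
  | i :: rest, ha_nums, ha_um_ponto =>
    match PySem.Str.pyGet? num i with
    | none => false   -- unreachable: every i comes from range(primeiro, length(num))
    | some c =>
      if eh_digito (String.singleton c) then ehLoopA num rest true ha_um_ponto
      else if eh_ponto c then
        (if ha_um_ponto then false else ehLoopA num rest ha_nums true)
      else false

def eh_numero (num : String) : Bool :=
  match PySem.Str.pyGet? num 0 with
  | none => false   -- Python raises IndexError on num[0]; excluded by Pre_
  | some c0 =>
    let primeiro : Int := if eh_traco c0 then 1 else 0
    ehLoopA num (PySem.List.pyRange primeiro (lengthA num) 1) false false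

-- ===== PORT B =====
-- inner 'for c in part' loop: none = early 'return False', some hd = updated has_digit
def scanPartB : List Char → Bool → Option Bool
  | [], has_digit => some has_digit
  | c :: cs, _ =>
    if '0' ≤ c ∧ c ≤ '9' then scanPartB cs true else none

-- outer 'for part in parts' loop
def scanPartsB : List (List Char) → Bool → Bool
  | [], has_digit => has_digit
  | p :: ps, has_digit =>
    match scanPartB p has_digit with
    | none => false
    | some hd => scanPartsB ps hd

def eh_numero_alt (num : String) : Bool :=
  match PySem.Str.pyGet? num 0 with
  | none => false   -- Python raises IndexError on num[0]; excluded by Pre_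
  | some c0 =>
    let body : List Char :=
      if c0 == '-' then PySem.List.slice num.toList (some 1) none else num.toList
    let parts := PySem.Chars.splitOn body ['.']
    if parts.length > 2 then false else scanPartsB parts false

-- ===== PRECONDITION & SPEC =====
-- Pre_ excludes only the empty string, on which A raises IndexError at num[0]
def Pre_eh_numero (num : String) : Prop := num.toList ≠ []
instance (num : String) : Decidable (Pre_eh_numero num) := by unfold Pre_eh_numero; infer_instance
def pvWitness_eh_numero : String := "-12.5"

def Spec_eh_numero (num : String) (out : Bool) : Prop := out = eh_numero_alt num
instance (num : String) (out : Bool) : Decidable (Spec_eh_numero num out) := by unfold Spec_eh_numero; infer_instance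

-- ===== CLAIM (what is proved, stated in full; the proofs are below) =====
def Claim_equal_eh_numero : Prop := ∀ (num : String), Dom_eh_numero num → Pre_eh_numero num → Spec_eh_numero num (eh_numero num)

-- ===== LEMMAS AND PROOFS =====

def isDig (c : Char) : Bool := decide ('0' ≤ c ∧ c ≤ '9')

-- reference scan: A's loop expressed directly on the character list
def refScan : List Char → Bool → Bool → Bool
  | [], hn, _ => hn
  | c :: cs, hn, hp =>
    if isDig c then refScan cs true hp
    else if c = '.' then (if hp then false else refScan cs hn true)
    else false

lemma char_eq_iff (c d : Char) : c = d ↔ c.toNat = d.toNat :=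
  ⟨fun h => by rw [h], fun h => Char.ext (UInt32.toNat_inj.mp h)⟩

lemma char_le_iff (c d : Char) : c ≤ d ↔ c.toNat ≤ d.toNat := by
  rw [Char.le_def, UInt32.le_iff_toNat_le]; rfl

lemma eh_digito_singleton (c : Char) : eh_digito (String.singleton c) = isDig c := by
  have h : PySem.List.pyRange 0 10 1 = [0,1,2,3,4,5,6,7,8,9] := by decide
  have hs : ∀ d : Char, (String.singleton c = String.singleton d) ↔ c = d := by
    intro d; simp [String.ext_iff]
  have e0 : PySem.Int.toStr 0 = String.singleton '0' := by decide
  have e1 : PySem.Int.toStr 1 = String.singleton '1' := by decide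
  have e2 : PySem.Int.toStr 2 = String.singleton '2' := by decide
  have e3 : PySem.Int.toStr 3 = String.singleton '3' := by decide
  have e4 : PySem.Int.toStr 4 = String.singleton '4' := by decide
  have e5 : PySem.Int.toStr 5 = String.singleton '5' := by decide
  have e6 : PySem.Int.toStr 6 = String.singleton '6' := by decide
  have e7 : PySem.Int.toStr 7 = String.singleton '7' := by decide
  have e8 : PySem.Int.toStr 8 = String.singleton '8' := by decide
  have e9 : PySem.Int.toStr 9 = String.singleton '9' := by decide
  rw [Bool.eq_iff_iff]
  unfold eh_digito isDig
  rw [h]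
  simp only [List.any_cons, List.any_nil, Bool.or_eq_true, beq_iff_eq,
    e0, e1, e2, e3, e4, e5, e6, e7, e8, e9, hs, decide_eq_true_eq,
    char_eq_iff, char_le_iff]
  have n0 : ('0' : Char).toNat = 48 := rfl
  have n1 : ('1' : Char).toNat = 49 := rfl
  have n2 : ('2' : Char).toNat = 50 := rfl
  have n3 : ('3' : Char).toNat = 51 := rfl
  have n4 : ('4' : Char).toNat = 52 := rfl
  have n5 : ('5' : Char).toNat = 53 := rfl
  have n6 : ('6' : Char).toNat = 54 := rfl
  have n7 : ('7' : Char).toNat = 55 := rfl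
  have n8 : ('8' : Char).toNat = 56 := rfl
  have n9 : ('9' : Char).toNat = 57 := rfl
  rw [n0, n1, n2, n3, n4, n5, n6, n7, n8, n9]
  simp only [Bool.false_eq_true, or_false]
  omega

lemma eh_ponto_eq (c : Char) : eh_ponto c = decide (c = '.') := by
  rw [Bool.eq_iff_iff]
  unfold eh_ponto
  simp only [beq_iff_eq, decide_eq_true_eq, char_eq_iff]
  have hd : ('.' : Char).toNat = 46 := rfl
  rw [hd]
  omega

lemma foldl_len (l : List Char) : ∀ k : Int, l.foldl (fun n _ => n + 1) k = k + l.length := by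
  induction l with
  | nil => intro k; simp
  | cons c cs ih => intro k; simp only [List.foldl_cons, ih, List.length_cons]; push_cast; ring

lemma lengthA_eq (num : String) : lengthA num = (num.toList.length : Int) := by
  unfold lengthA; rw [foldl_len]; omega

lemma pyRange_nil (a b : Int) (h : b ≤ a) : PySem.List.pyRange a b 1 = [] := by
  rw [List.eq_nil_iff_forall_not_mem]; intro x hx
  rw [PySem.List.mem_pyRange_one] at hx; omega

lemma loopA_eq (num : String) :
    ∀ (k a : Nat), num.toList.length - a = k → ∀ hn hp,
      ehLoopA num (PySem.List.pyRange (a : Int) (num.toList.length : Int) 1) hn hp =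
        refScan (num.toList.drop a) hn hp := by
  intro k
  induction k with
  | zero =>
    intro a ha hn hp
    rw [pyRange_nil _ _ (by exact_mod_cast by omega), List.drop_of_length_le (by omega)]
    rfl
  | succ k ih =>
    intro a ha hn hp
    have hlt : a < num.toList.length := by omega
    rw [PySem.List.pyRange_one_cons (by exact_mod_cast hlt)]
    rw [List.drop_eq_getElem_cons hlt]
    have hget : PySem.Str.pyGet? num (a : Int) = some num.toList[a] := by
      rw [PySem.Str.pyGet?_natCast, List.getElem?_eq_getElem hlt]
    show (match PySem.Str.pyGet? num (a : Int) with
      | none => false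
      | some c =>
        if eh_digito (String.singleton c) then
          ehLoopA num (PySem.List.pyRange ((a : Int) + 1) (num.toList.length : Int) 1) true hp
        else if eh_ponto c then
          (if hp then false
           else ehLoopA num (PySem.List.pyRange ((a : Int) + 1) (num.toList.length : Int) 1) hn true)
        else false) = _
    rw [hget]
    have hnext : ((a : Int) + 1) = ((a + 1 : Nat) : Int) := by push_cast; ring
    rw [hnext]
    have ih1 := ih (a + 1) (by omega)
    simp only [eh_digito_singleton, eh_ponto_eq, refScan]
    rw [ih1, ih1]
    by_cases hd : isDig num.toList[a]
    · simp [hd]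
    · by_cases hpt : num.toList[a] = '.'
      · simp [hd, hpt]
      · simp [hd, hpt]

-- ---- splitOn characterisation ----

def mySplit : List Char → List (List Char)
  | [] => [[]]
  | c :: cs => if c = '.' then [] :: mySplit cs else (mySplit cs).modifyHead (c :: ·)

lemma mySplit_ne_nil (l : List Char) : mySplit l ≠ [] := by
  induction l with
  | nil => simp [mySplit]
  | cons c cs ih =>
    simp only [mySplit]
    split
    · simp
    · cases h : mySplit cs with
      | nil => exact absurd h ih
      | cons p ps => simp

def consHead (p : List Char) : List (List Char) → List (List Char)
  | [] => [p]
  | h :: t => (p ++ h) :: t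

lemma go_eq (fuel : Nat) : ∀ (l cur : List Char) (acc : List (List Char)),
    l.length < fuel →
    PySem.Chars.splitOn.go ['.'] fuel l cur acc = acc.reverse ++ consHead cur.reverse (mySplit l) := by
  induction fuel with
  | zero => intro l cur acc h; omega
  | succ fuel ih =>
    intro l cur acc h
    cases l with
    | nil =>
      show (cur.reverse :: acc).reverse = _
      simp [mySplit, consHead]
    | cons c rest =>
      show (if (['.'] : List Char).isPrefixOf (c :: rest) then
          PySem.Chars.splitOn.go ['.'] fuel (List.drop (['.'] : List Char).length (c :: rest)) [] (cur.reverse :: acc)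
        else PySem.Chars.splitOn.go ['.'] fuel rest (c :: cur) acc) = _
      by_cases hc : c = '.'
      · subst hc
        rw [if_pos (by simp [List.isPrefixOf])]
        simp only [List.length_cons, List.length_nil, Nat.zero_add, List.drop_one, List.tail_cons]
        rw [ih rest [] _ (by simpa using Nat.lt_of_succ_lt_succ (by simpa using h))]
        cases hm : mySplit rest with
        | nil => exact absurd hm (mySplit_ne_nil rest)
        | cons p ps =>
          simp [mySplit, consHead, hm]
      · rw [if_neg (by simp [List.isPrefixOf]; exact fun h' => hc h'.symm)]
        rw [ih rest (c :: cur) acc (by simpa using Nat.lt_of_succ_lt_succ (by simpa using h))]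
        cases hm : mySplit rest with
        | nil => exact absurd hm (mySplit_ne_nil rest)
        | cons p ps =>
          simp [mySplit, consHead, hm, hc]

lemma splitOn_eq (l : List Char) : PySem.Chars.splitOn l ['.'] = mySplit l := by
  show PySem.Chars.splitOn.go ['.'] (l.length + 1) l [] [] = _
  rw [go_eq (l.length + 1) l [] [] (by omega)]
  cases hm : mySplit l with
  | nil => exact absurd hm (mySplit_ne_nil l)
  | cons p ps => simp [consHead]

lemma isDig_dot : isDig '.' = false := by decide

lemma length_mySplit (l : List Char) : (mySplit l).length = l.count '.' + 1 := by
  induction l with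
  | nil => simp [mySplit]
  | cons c cs ih =>
    simp only [mySplit]
    by_cases hc : c = '.'
    · simp [hc, List.count_cons, ih]
    · simp [hc, ih, List.length_modifyHead]

lemma all_mySplit (l : List Char) :
    (mySplit l).all (fun p => p.all isDig) = l.all (fun c => isDig c || c == '.') := by
  induction l with
  | nil => simp [mySplit]
  | cons c cs ih =>
    simp only [mySplit]
    by_cases hc : c = '.'
    · simp [hc, ← ih]
    · cases hm : mySplit cs with
      | nil => exact absurd hm (mySplit_ne_nil cs)
      | cons p ps =>
        rw [hm] at ih
        rw [if_neg hc] at *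
        rw [List.modifyHead_cons]
        have hbe : (c == '.') = false := by simp [hc]
        simp only [List.all_cons] at *
        rw [← ih]
        simp [hbe, Bool.and_assoc]

lemma any_mySplit (l : List Char) :
    (mySplit l).any (fun p => !p.isEmpty) = l.any (fun c => c != '.') := by
  induction l with
  | nil => simp [mySplit]
  | cons c cs ih =>
    simp only [mySplit]
    by_cases hc : c = '.'
    · simp [hc, ← ih]
    · cases hm : mySplit cs with
      | nil => exact absurd hm (mySplit_ne_nil cs)
      | cons p ps =>
        rw [hm] at ih
        rw [if_neg hc] at *
        rw [List.modifyHead_cons]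
        simp [hc]

lemma refScan_eq (l : List Char) : ∀ hn hp,
    refScan l hn hp =
      (decide (l.count '.' + (if hp then 1 else 0) ≤ 1)
        && l.all (fun c => isDig c || c == '.')
        && (hn || l.any isDig)) := by
  induction l with
  | nil => intro hn hp; cases hp <;> cases hn <;> simp [refScan]
  | cons c cs ih =>
    intro hn hp
    simp only [refScan]
    by_cases hd : isDig c
    · have hc : ¬ c = '.' := by intro h; rw [h] at hd; simp [isDig_dot] at hd
      rw [if_pos hd, ih]
      simp [List.count_cons, hc, hd]
    · rw [if_neg hd]
      by_cases hc : c = '.'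
      · subst hc
        rw [if_pos rfl]
        cases hp with
        | true => simp [List.count_cons, isDig_dot]
        | false =>
          rw [if_neg (by simp)]
          rw [ih]
          simp [List.count_cons, isDig_dot, hd]
      · rw [if_neg hc]
        simp [hd, hc]

lemma scanPartB_eq (p : List Char) : ∀ hd,
    scanPartB p hd = if p.all isDig then some (hd || !p.isEmpty) else none := by
  induction p with
  | nil => intro hd; simp [scanPartB]
  | cons c cs ih =>
    intro hd
    simp only [scanPartB, List.all_cons]
    by_cases h : '0' ≤ c ∧ c ≤ '9'
    · rw [if_pos h, ih]
      have : isDig c = true := by simp [isDig, h]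
      simp [this]
    · have : isDig c = false := by simp [isDig, h]
      simp [h, this]

lemma scanPartsB_eq (parts : List (List Char)) : ∀ hd,
    scanPartsB parts hd =
      (parts.all (fun p => p.all isDig) && (hd || parts.any (fun p => !p.isEmpty))) := by
  induction parts with
  | nil => intro hd; simp [scanPartsB]
  | cons p ps ih =>
    intro hd
    simp only [scanPartsB, scanPartB_eq]
    by_cases h : p.all isDig
    · rw [if_pos h]
      simp only [ih]
      simp [h, Bool.or_assoc]
    · rw [if_neg h]
      simp [h]

lemma any_cong (l : List Char) (h : l.all (fun c => isDig c || c == '.') = true) :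
    l.any (fun c => c != '.') = l.any isDig := by
  rw [Bool.eq_iff_iff]
  simp only [List.any_eq_true, List.all_eq_true, Bool.or_eq_true, beq_iff_eq, bne_iff_ne] at *
  constructor
  · rintro ⟨c, hc, hne⟩
    rcases h c hc with hdig | hdot
    · exact ⟨c, hc, hdig⟩
    · exact absurd hdot hne
  · rintro ⟨c, hc, hdig⟩
    refine ⟨c, hc, ?_⟩
    intro hdot
    rw [hdot] at hdig
    simp [isDig_dot] at hdig

lemma body_eq (l : List Char) :
    refScan l false false =
      (if (PySem.Chars.splitOn l ['.']).length > 2 then false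
       else scanPartsB (PySem.Chars.splitOn l ['.']) false) := by
  rw [splitOn_eq, refScan_eq, length_mySplit, scanPartsB_eq, all_mySplit, any_mySplit]
  simp only [Bool.false_eq_true, if_false, Nat.add_zero, Bool.false_or]
  split_ifs with hgt
  · have hc2 : ¬ l.count '.' ≤ 1 := by omega
    simp [hc2]
  · have hcnt : l.count '.' ≤ 1 := by omega
    by_cases hall : l.all (fun c => isDig c || c == '.') = true
    · simp [hcnt, hall, any_cong l hall]
    · simp only [Bool.not_eq_true] at hall
      simp [hall]

-- ===== VERDICT (by name: the statement is the Claim_ definition above) =====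
theorem eh_numero_spec : Claim_equal_eh_numero := by
  intro num _ hpre
  unfold Spec_eh_numero eh_numero eh_numero_alt
  obtain ⟨c0, rest, hl⟩ : ∃ c0 rest, num.toList = c0 :: rest := by
    cases h : num.toList with
    | nil => exact absurd h hpre
    | cons a b => exact ⟨a, b, rfl⟩
  have hget0 : PySem.Str.pyGet? num 0 = some c0 := by
    have : ((0 : Int)) = ((0 : Nat) : Int) := rfl
    rw [this, PySem.Str.pyGet?_natCast, hl]
    rfl
  rw [hget0]
  simp only [lengthA_eq]
  by_cases hdash : c0 = '-'
  · have htr : eh_traco c0 = true := by simp [eh_traco, hdash]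
    have hbe : (c0 == '-') = true := by simp [hdash]
    rw [htr, hbe]
    have epos : ∀ {α : Type} (a b : α), (if (true : Bool) = true then a else b) = a :=
      fun a b => if_pos rfl
    rw [epos, epos]
    show ehLoopA num (PySem.List.pyRange ((1 : Nat) : Int) ((num.toList.length : Nat) : Int) 1) false false = _
    rw [loopA_eq num (num.toList.length - 1) 1 rfl false false]
    rw [PySem.List.slice_from_one, ← List.drop_one]
    exact body_eq _
  · have htr : eh_traco c0 = false := by simp [eh_traco, hdash]
    have hbe : (c0 == '-') = false := by simp [hdash]
    rw [htr, hbe]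
    have eneg : ∀ {α : Type} (a b : α), (if (false : Bool) = true then a else b) = b :=
      fun a b => if_neg (by simp)
    rw [eneg, eneg]
    show ehLoopA num (PySem.List.pyRange ((0 : Nat) : Int) ((num.toList.length : Nat) : Int) 1) false false = _
    rw [loopA_eq num num.toList.length 0 rfl false false]
    rw [List.drop_zero]
    exact body_eq _
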